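-- pv_equiv track=rewrite | github.com/ksm007/innohack2.0 | backend/app/services/policy_service.py | _summarize_status
-- ===== SOURCE A (Python) =====
-- def _summarize_status(statuses: list[str]) -> str:
--     lowered = [str(status).strip().lower() for status in statuses if str(status).strip()]
--     if not lowered:
--         return "unknown"
--     if any(status == "answered" for status in lowered):
--         return "answered"
--     if any(status == "review required" for status in lowered):
--         return "review required"
--     if any(status == "partial" for status in lowered):
--         return "partial"
--     return lowered[0]
-- ===== SOURCE B (Python) =====
-- _RANK = {"answered": 0, "review required": 1, "partial": 2}
-- _LABELS = ("answered", "review required", "partial")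
--
--
-- def _summarize_status(statuses: list[str]) -> str:
--     best = 3
--     first = None
--     for status in statuses:
--         s = str(status).strip()
--         if not s:
--             continue
--         s = s.lower()
--         if first is None:
--             first = s
--         r = _RANK.get(s, 3)
--         if r < best:
--             best = r
--     if first is None:
--         return "unknown"
--     return _LABELS[best] if best < 3 else first
-- ===== Notes on version B (the rewrite author's own statement) =====
-- stated objective: alternative
-- what changed: Replaces the build-filtered-list-then-three-any-scans structure by a single pass that keeps the minimum priority rank (via a rank table) and the first normalized status, mapping the best rank back to its label at the end.
import Mathlib
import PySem

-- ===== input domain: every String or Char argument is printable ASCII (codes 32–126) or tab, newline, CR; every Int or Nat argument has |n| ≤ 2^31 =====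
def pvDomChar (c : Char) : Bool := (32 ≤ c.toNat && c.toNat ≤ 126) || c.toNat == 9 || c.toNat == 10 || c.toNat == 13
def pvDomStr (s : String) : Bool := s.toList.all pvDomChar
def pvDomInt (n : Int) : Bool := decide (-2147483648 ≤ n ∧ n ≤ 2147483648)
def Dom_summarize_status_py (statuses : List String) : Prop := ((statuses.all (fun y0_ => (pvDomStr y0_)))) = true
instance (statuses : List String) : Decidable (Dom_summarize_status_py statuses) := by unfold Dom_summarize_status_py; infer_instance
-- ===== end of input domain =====

-- B replaces A's build-filtered-list-plus-three-any-scans by one pass keeping the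
-- minimum priority rank (rank table) and the first normalized status (alternative decomposition).

-- ===== PORT A =====
def summarize_status_py (statuses : List String) : String :=
  let lowered := (statuses.filter (fun s => !(PySem.Str.strip s == ""))).map
      (fun s => PySem.Str.lower (PySem.Str.strip s))
  if lowered = [] then "unknown"
  else if lowered.any (fun s => s == "answered") then "answered"
  else if lowered.any (fun s => s == "review required") then "review required"
  else if lowered.any (fun s => s == "partial") then "partial"
  else (PySem.List.pyGet? lowered 0).getD ""   -- lowered[0]; the guard above makes it nonempty

-- ===== PORT B =====
def pvRank : PySem.Dict String Int :=
  ((PySem.Dict.empty.insert "answered" 0).insert "review required" 1).insert "partial" 2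

def pvLabels : List String := ["answered", "review required", "partial"]

def summarize_status_py_alt (statuses : List String) : String :=
  let st := statuses.foldl (fun (acc : Int × Option String) status =>
    let s := PySem.Str.strip status
    if s == "" then acc
    else
      let s' := PySem.Str.lower s
      let first := match acc.2 with
        | none => some s'
        | some x => some x
      let r := pvRank.getD s' 3
      ((if r < acc.1 then r else acc.1), first)) ((3 : Int), (none : Option String))
  match st.2 with
  | none => "unknown"
  | some first => if st.1 < 3 then (PySem.List.pyGet? pvLabels st.1).getD "" else first

-- ===== PRECONDITION & SPEC =====
def Spec_summarize_status_py (statuses : List String) (out : String) : Prop := out = summarize_status_py_alt statuses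
instance (statuses : List String) (out : String) : Decidable (Spec_summarize_status_py statuses out) := by unfold Spec_summarize_status_py; infer_instance

-- ===== CLAIM (what is proved, stated in full; the proofs are below) =====
def Claim_equal_summarize_status_py : Prop := ∀ (statuses : List String), Dom_summarize_status_py statuses → Spec_summarize_status_py statuses (summarize_status_py statuses)

-- ===== LEMMAS AND PROOFS =====

/-- A's normalized list. -/
def pvLowered (statuses : List String) : List String :=
  (statuses.filter (fun s => !(PySem.Str.strip s == ""))).map
    (fun s => PySem.Str.lower (PySem.Str.strip s))

/-- Priority rank of a normalized status. -/
def pvRankOf (s : String) : Int :=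
  if s = "answered" then 0 else if s = "review required" then 1
  else if s = "partial" then 2 else 3

theorem pvRank_getD (s : String) : pvRank.getD s 3 = pvRankOf s := by
  unfold pvRank pvRankOf
  rw [PySem.Dict.getD_insert, PySem.Dict.getD_insert, PySem.Dict.getD_insert]
  split_ifs <;> simp_all [PySem.Dict.getD, PySem.Dict.get?, PySem.Dict.empty]

/-- B's loop body, named. -/
def pvStep (acc : Int × Option String) (status : String) : Int × Option String :=
  if PySem.Str.strip status = "" then acc
  else
    let s' := PySem.Str.lower (PySem.Str.strip status)
    ((if pvRankOf s' < acc.1 then pvRankOf s' else acc.1),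
     match acc.2 with
     | none => some s'
     | some x => some x)

theorem pvStep_eq :
    (fun (acc : Int × Option String) status =>
      let s := PySem.Str.strip status
      if s == "" then acc
      else
        let s' := PySem.Str.lower s
        let first := match acc.2 with
          | none => some s'
          | some x => some x
        let r := pvRank.getD s' 3
        ((if r < acc.1 then r else acc.1), first)) = pvStep := by
  funext acc status
  simp [pvStep, pvRank_getD]

/-- Closed form of the minimum rank over a list. -/
def pvM (L : List String) : Int :=
  if "answered" ∈ L then 0 else if "review required" ∈ L then 1
  else if "partial" ∈ L then 2 else 3

theorem pvM_bounds (L : List String) : 0 ≤ pvM L ∧ pvM L ≤ 3 := by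
  unfold pvM; split_ifs <;> norm_num

theorem pvRankOf_bounds (s : String) : 0 ≤ pvRankOf s ∧ pvRankOf s ≤ 3 := by
  unfold pvRankOf; split_ifs <;> norm_num

theorem pvM_cons (s : String) (t : List String) :
    pvM (s :: t) = min (pvRankOf s) (pvM t) := by
  by_cases a1 : s = "answered" <;> by_cases a2 : s = "review required" <;>
    by_cases a3 : s = "partial" <;>
  by_cases m1 : "answered" ∈ t <;> by_cases m2 : "review required" ∈ t <;>
    by_cases m3 : "partial" ∈ t <;>
    simp [pvM, pvRankOf, a1, a2, a3, m1, m2, m3] <;> simp_all [eq_comm]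

/-- The min-fold over the normalized list equals `min b (pvM L)` for `b ≤ 3`. -/
theorem pvMinFold (L : List String) : ∀ b : Int, b ≤ 3 →
    L.foldl (fun b s => if pvRankOf s < b then pvRankOf s else b) b = min b (pvM L) := by
  induction L with
  | nil => intro b hb; simp [pvM]; omega
  | cons s t ih =>
    intro b hb
    have hr := pvRankOf_bounds s
    have step : (if pvRankOf s < b then pvRankOf s else b) = min b (pvRankOf s) := by
      split_ifs <;> omega
    have hb2 : min b (pvRankOf s) ≤ 3 := by omega
    have ht := pvM_bounds t
    rw [List.foldl_cons, step, ih _ hb2, pvM_cons]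
    omega

/-- Characterization of B's fold: it computes the min rank and the head of `pvLowered`. -/
theorem pvFold_char (statuses : List String) : ∀ (b : Int) (f : Option String),
    statuses.foldl pvStep (b, f)
    = ((pvLowered statuses).foldl (fun b s => if pvRankOf s < b then pvRankOf s else b) b,
       match f with
       | none => (pvLowered statuses).head?
       | some x => some x) := by
  induction statuses with
  | nil => intro b f; cases f <;> simp [pvLowered]
  | cons s t ih =>
    intro b f
    by_cases hs : PySem.Str.strip s = ""
    · cases f <;> simpa [pvLowered, pvStep, hs] using ih b _
    · cases f <;> simp [pvLowered, pvStep, hs, List.foldl_cons, ih]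

/-- B in terms of `pvLowered` and `pvM`. -/
theorem pvAlt_eq (statuses : List String) :
    summarize_status_py_alt statuses =
      match pvLowered statuses with
      | [] => "unknown"
      | h :: t =>
          if pvM (h :: t) < 3 then (PySem.List.pyGet? pvLabels (pvM (h :: t))).getD "" else h := by
  unfold summarize_status_py_alt
  rw [pvStep_eq, pvFold_char statuses 3 none,
    pvMinFold (pvLowered statuses) 3 (by norm_num)]
  have hM := pvM_bounds (pvLowered statuses)
  have hmin : min (3 : Int) (pvM (pvLowered statuses)) = pvM (pvLowered statuses) := by omega
  rw [hmin]
  cases hL : pvLowered statuses with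
  | nil => rfl
  | cons h t => rfl

-- ===== VERDICT (by name: the statement is the Claim_ definition above) =====
theorem summarize_status_py_spec : Claim_equal_summarize_status_py := by
  intro statuses _
  show summarize_status_py statuses = summarize_status_py_alt statuses
  rw [pvAlt_eq]
  show (if pvLowered statuses = [] then "unknown"
    else if (pvLowered statuses).any (fun s => s == "answered") then "answered"
    else if (pvLowered statuses).any (fun s => s == "review required") then "review required"
    else if (pvLowered statuses).any (fun s => s == "partial") then "partial"
    else (PySem.List.pyGet? (pvLowered statuses) 0).getD "") = _
  cases hL : pvLowered statuses with
  | nil => rfl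
  | cons h t =>
    have hany : ∀ x : String, ((h :: t).any (fun s => s == x)) = decide (x ∈ h :: t) := by
      intro x
      by_cases hx : x ∈ h :: t
      · rw [List.any_eq_true.mpr ⟨x, hx, by simp⟩, decide_eq_true hx]
      · simp only [hx, decide_false]
        rw [List.any_eq_false]
        intro s hs
        simp only [beq_iff_eq]
        exact fun e => hx (e ▸ hs)
    simp only [hany]
    by_cases h1 : "answered" ∈ h :: t <;> by_cases h2 : "review required" ∈ h :: t <;>
      by_cases h3 : "partial" ∈ h :: t <;>
      simp [pvM, h1, h2, h3, pvLabels, PySem.List.pyGet?, PySem.List.pyIdx?]
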